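-- pv_equiv track=rewrite | github.com/olaservo/fast-agent | src/fast_agent/ui/stream_segments.py | _skip_json_value
-- ===== SOURCE A (Python) =====
-- def _decode_json_string_at(raw_text: str, start_index: int) -> tuple[str, int, bool]:
--     if start_index >= len(raw_text) or raw_text[start_index] != '"':
--         return "", start_index, False
--
--     result: list[str] = []
--     index = start_index + 1
--     length = len(raw_text)
--
--     while index < length:
--         char = raw_text[index]
--         if char == '"':
--             return "".join(result), index + 1, True
--         if char != "\\":
--             result.append(char)
--             index += 1
--             continue
--         if index + 1 >= length:
--             return "".join(result), length, False
--
--         escape = raw_text[index + 1]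
--         simple_escapes = {
--             '"': '"',
--             "\\": "\\",
--             "/": "/",
--             "b": "\b",
--             "f": "\f",
--             "n": "\n",
--             "r": "\r",
--             "t": "\t",
--         }
--         replacement = simple_escapes.get(escape)
--         if replacement is not None:
--             result.append(replacement)
--             index += 2
--             continue
--         if escape == "u":
--             if index + 5 >= length:
--                 return "".join(result), length, False
--             hex_digits = raw_text[index + 2 : index + 6]
--             try:
--                 result.append(chr(int(hex_digits, 16)))
--             except ValueError:
--                 result.append("\\u" + hex_digits)
--             index += 6
--             continue
--
--         result.append(escape)
--         index += 2
--
--     return "".join(result), length, False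
--
-- def _skip_json_value(raw_text: str, start_index: int) -> int:
--     length = len(raw_text)
--     if start_index >= length:
--         return -1
--
--     char = raw_text[start_index]
--     if char == '"':
--         _, end_index, complete = _decode_json_string_at(raw_text, start_index)
--         return end_index if complete else -1
--
--     if char in "[{":
--         stack = [char]
--         index = start_index + 1
--         in_string = False
--         escape = False
--         matching = {"{": "}", "[": "]"}
--
--         while index < length:
--             current = raw_text[index]
--             if in_string:
--                 if escape:
--                     escape = False
--                 elif current == "\\":
--                     escape = True
--                 elif current == '"':
--                     in_string = False
--                 index += 1
--                 continue
--
--             if current == '"':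
--                 in_string = True
--             elif current in "[{":
--                 stack.append(current)
--             elif current in "]}":
--                 if not stack or matching[stack[-1]] != current:
--                     return -1
--                 stack.pop()
--                 if not stack:
--                     return index + 1
--             index += 1
--
--         return -1
--
--     index = start_index
--     while index < length and raw_text[index] not in ",}":
--         index += 1
--     return index
-- ===== SOURCE B (Python) =====
-- def _scan_string_end(raw_text, index, length):
--     """Return the index just past a JSON string's closing quote (opening quote at
--     index-1), or None if the string is unterminated; does not decode the text."""
--     while index < length:
--         c = raw_text[index]
--         if c == '"':
--             return index + 1
--         if c == '\\':
--             if index + 1 >= length: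
--                 return None
--             if raw_text[index + 1] == 'u':
--                 if index + 5 >= length:
--                     return None
--                 index += 6
--             else:
--                 index += 2
--         else:
--             index += 1
--     return None
--
--
-- def _skip_container(raw_text, open_char, index, length):
--     """Skip one bracketed container whose opener was at index-1; None on failure."""
--     close_char = "}" if open_char == "{" else "]"
--     while index < length:
--         current = raw_text[index]
--         if current == '"':
--             index += 1
--             while index < length:
--                 c = raw_text[index]
--                 if c == '"':
--                     index += 1
--                     break
--                 index += 2 if c == "\\" else 1
--             else:
--                 return None
--             continue
--         if current in "[{":
--             index = _skip_container(raw_text, current, index + 1, length)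
--             if index is None:
--                 return None
--             continue
--         if current in "]}":
--             return index + 1 if current == close_char else None
--         index += 1
--     return None
--
--
-- def _skip_json_value(raw_text: str, start_index: int) -> int:
--     length = len(raw_text)
--     if start_index >= length:
--         return -1
--
--     char = raw_text[start_index]
--     if char == '"':
--         end = _scan_string_end(raw_text, start_index + 1, length)
--         return -1 if end is None else end
--
--     if char in "[{":
--         end = _skip_container(raw_text, char, start_index + 1, length)
--         return -1 if end is None else end
--
--     return next((i for i in range(start_index, length) if raw_text[i] in ",}"),
--                 length)
-- ===== Notes on version B (the rewrite author's own statement) =====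
-- stated objective: alternative
-- what changed: B replaces all three branches' machinery: the string branch uses a non-decoding end-of-string scanner instead of delegating to the full decoder, the explicit-stack container loop becomes a recursive skip-container helper propagating failure as None, and the trailing primitive while-loop becomes a first-match search over the index range.
import Mathlib
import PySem

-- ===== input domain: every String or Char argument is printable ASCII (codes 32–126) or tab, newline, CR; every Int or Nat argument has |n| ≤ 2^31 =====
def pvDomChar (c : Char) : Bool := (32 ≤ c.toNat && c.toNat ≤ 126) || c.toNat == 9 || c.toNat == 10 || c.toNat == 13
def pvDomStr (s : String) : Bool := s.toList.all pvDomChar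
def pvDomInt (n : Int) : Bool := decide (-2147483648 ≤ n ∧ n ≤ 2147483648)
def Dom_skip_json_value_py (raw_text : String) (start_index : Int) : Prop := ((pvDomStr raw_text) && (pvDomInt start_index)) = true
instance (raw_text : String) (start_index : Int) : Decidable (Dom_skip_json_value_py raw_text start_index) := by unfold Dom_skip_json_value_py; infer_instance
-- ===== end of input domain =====

-- B re-decomposes all three branches: a non-decoding end-of-string scanner replaces the
-- full string decoder, a recursive skip-container helper replaces the explicit-stack loop,
-- and a first-match search over the index range replaces the primitive while-loop.
-- Objective: alternative decomposition, same asymptotic cost.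
-- In both ports every while loop carries a Nat fuel argument as a totality guard only:
-- each iteration advances the index, so the fuel 2*len+2 passed at the call site is never
-- exhausted on any admitted input.

-- ===== PORT A =====

-- raw_text[i] (Python wraparound); the default is only reached where Python would raise
-- IndexError, which Pre_ excludes.
def pvCharAt (cs : List Char) (i : Int) : Char := (PySem.List.pyGet? cs i).getD ' '

-- the simple_escapes dict lookup (literal dict, read-only: ported as a match)
def pvSimpleEscape (c : Char) : Option Char :=
  if c = '"' then some '"'
  else if c = '\\' then some '\\'
  else if c = '/' then some '/'
  else if c = 'b' then some (Char.ofNat 8)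
  else if c = 'f' then some (Char.ofNat 12)
  else if c = 'n' then some (Char.ofNat 10)
  else if c = 'r' then some (Char.ofNat 13)
  else if c = 't' then some (Char.ofNat 9)
  else none

-- the while loop of _decode_json_string_at (A delegates its string branch to it).
-- chr(int(hex,16)): Char.ofNat is exact except for surrogate code points (which Lean's Char
-- cannot hold); the decoded TEXT is never used by _skip_json_value, only index and flag are.
def pvDecodeLoop (cs : List Char) (L : Int) : Nat → List Char → Int → List Char × Int × Bool
  | 0, result, _ => (result, L, false)   -- unreachable: fuel is a totality guard only
  | fuel + 1, result, index =>
    if index < L then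
      let char := pvCharAt cs index
      if char = '"' then (result, index + 1, true)
      else if char ≠ '\\' then pvDecodeLoop cs L fuel (result ++ [char]) (index + 1)
      else if index + 1 ≥ L then (result, L, false)
      else
        let esc := pvCharAt cs (index + 1)
        match pvSimpleEscape esc with
        | some r => pvDecodeLoop cs L fuel (result ++ [r]) (index + 2)
        | none =>
          if esc = 'u' then
            if index + 5 ≥ L then (result, L, false)
            else
              let hexd := PySem.List.slice cs (some (index + 2)) (some (index + 6))
              match PySem.Int.ofCharsBase? hexd 16 with
              | some n =>
                -- chr raises ValueError outside [0, 0x10FFFF]; then Python appends "\u"+hex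
                if 0 ≤ n ∧ n ≤ 1114111 then
                  pvDecodeLoop cs L fuel (result ++ [Char.ofNat n.toNat]) (index + 6)
                else pvDecodeLoop cs L fuel (result ++ '\\' :: 'u' :: hexd) (index + 6)
              | none => pvDecodeLoop cs L fuel (result ++ '\\' :: 'u' :: hexd) (index + 6)
          else pvDecodeLoop cs L fuel (result ++ [esc]) (index + 2)
    else (result, L, false)

def pvDecodeStringAt (cs : List Char) (L : Int) (start_index : Int) :
    List Char × Int × Bool :=
  if start_index ≥ L ∨ pvCharAt cs start_index ≠ '"' then ([], start_index, false)
  else pvDecodeLoop cs L (2 * cs.length + 2) [] (start_index + 1)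

-- matching[stack[-1]] (stack holds only '[' and '{', so the dict lookup is this match)
def pvMatching (c : Char) : Char := if c = '{' then '}' else ']'

-- A's container while loop; the Python stack's top (stack[-1]) is the list head here.
def pvAContLoop (cs : List Char) (L : Int) : Nat → List Char → Int → Bool → Bool → Int
  | 0, _, _, _, _ => -1   -- unreachable: fuel is a totality guard only
  | fuel + 1, stack, index, in_string, escape =>
    if index < L then
      let current := pvCharAt cs index
      if in_string then
        if escape then pvAContLoop cs L fuel stack (index + 1) true false
        else if current = '\\' then pvAContLoop cs L fuel stack (index + 1) true true
        else if current = '"' then pvAContLoop cs L fuel stack (index + 1) false escape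
        else pvAContLoop cs L fuel stack (index + 1) in_string escape
      else if current = '"' then pvAContLoop cs L fuel stack (index + 1) true escape
      else if current = '[' ∨ current = '{' then
        pvAContLoop cs L fuel (current :: stack) (index + 1) in_string escape
      else if current = ']' ∨ current = '}' then
        match stack with
        | [] => -1
        | top :: rest =>
          if pvMatching top ≠ current then -1
          else if rest = [] then index + 1
          else pvAContLoop cs L fuel rest (index + 1) in_string escape
      else pvAContLoop cs L fuel stack (index + 1) in_string escape
    else -1

-- A's trailing primitive scan: while index < length and raw_text[index] not in ",}"
def pvAPrim (cs : List Char) (L : Int) : Nat → Int → Int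
  | 0, index => index   -- unreachable: fuel is a totality guard only
  | fuel + 1, index =>
    if index < L then
      if ¬ (pvCharAt cs index = ',' ∨ pvCharAt cs index = '}') then
        pvAPrim cs L fuel (index + 1)
      else index
    else index

def skip_json_value_py (raw_text : String) (start_index : Int) : Int :=
  let cs := raw_text.toList
  let L : Int := cs.length
  if start_index ≥ L then -1
  else
    let char := pvCharAt cs start_index
    if char = '"' then
      let r := pvDecodeStringAt cs L start_index
      if r.2.2 then r.2.1 else -1
    else if char = '[' ∨ char = '{' then
      pvAContLoop cs L (2 * cs.length + 2) [char] (start_index + 1) false false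
    else pvAPrim cs L (2 * cs.length + 2) start_index

-- ===== PORT B =====

-- raw_text[i] for B (Python wraparound); default only where Python raises, excluded by Pre_.
def pvBCharAt (cs : List Char) (i : Int) : Char := (PySem.List.pyGet? cs i).getD ' '

-- B's _scan_string_end: find the end of a JSON string without decoding it; none = unterminated.
def pvBStrEnd (cs : List Char) (L : Int) : Nat → Int → Option Int
  | 0, _ => none
  | fuel + 1, index =>
    if index < L then
      let c := pvBCharAt cs index
      if c = '"' then some (index + 1)
      else if c = '\\' then
        if index + 1 ≥ L then none
        else if pvBCharAt cs (index + 1) = 'u' then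
          if index + 5 ≥ L then none else pvBStrEnd cs L fuel (index + 6)
        else pvBStrEnd cs L fuel (index + 2)
      else pvBStrEnd cs L fuel (index + 1)
    else none

-- B's inline string skip inside a container (index += 2 on backslash); none = unterminated.
def pvBStr (cs : List Char) (L : Int) : Nat → Int → Option Int
  | 0, _ => none
  | fuel + 1, index =>
    if index < L then
      let c := pvBCharAt cs index
      if c = '"' then some (index + 1)
      else pvBStr cs L fuel (index + if c = '\\' then 2 else 1)
    else none

-- B's recursive _skip_container; none = failure (Python None).
def pvBCont (cs : List Char) (L : Int) : Nat → Char → Int → Option Int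
  | 0, _, _ => none
  | fuel + 1, openChar, index =>
    if index < L then
      let current := pvBCharAt cs index
      if current = '"' then
        match pvBStr cs L fuel (index + 1) with
        | some j => pvBCont cs L fuel openChar j
        | none => none
      else if current = '[' ∨ current = '{' then
        match pvBCont cs L fuel current (index + 1) with
        | some j => pvBCont cs L fuel openChar j
        | none => none
      else if current = ']' ∨ current = '}' then
        if current = (if openChar = '{' then '}' else ']') then some (index + 1) else none
      else pvBCont cs L fuel openChar (index + 1)
    else none

-- B's primitive branch: next(i for i in range(start, length) if raw_text[i] in ",}"), else length
def pvBPrim (cs : List Char) (L : Int) (start : Int) : Int :=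
  match (PySem.List.pyRange start L 1).find?
      (fun i => (pvBCharAt cs i == ',') || (pvBCharAt cs i == '}')) with
  | some j => j
  | none => L

def skip_json_value_py_alt (raw_text : String) (start_index : Int) : Int :=
  let cs := raw_text.toList
  let L : Int := cs.length
  if start_index ≥ L then -1
  else
    let char := pvBCharAt cs start_index
    if char = '"' then
      match pvBStrEnd cs L (2 * cs.length + 2) (start_index + 1) with
      | some j => j
      | none => -1
    else if char = '[' ∨ char = '{' then
      match pvBCont cs L (2 * cs.length + 2) char (start_index + 1) with
      | some j => j
      | none => -1
    else pvBPrim cs L start_index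

-- ===== PRECONDITION & SPEC =====
-- Pre_ excludes exactly start_index < -len(raw_text), where raw_text[start_index] raises
-- IndexError in A (negative Python indices down to -len wrap around and are kept inside Pre_).
def Pre_skip_json_value_py (raw_text : String) (start_index : Int) : Prop :=
  -(raw_text.toList.length : Int) ≤ start_index
instance (raw_text : String) (start_index : Int) : Decidable (Pre_skip_json_value_py raw_text start_index) := by unfold Pre_skip_json_value_py; infer_instance

def pvWitness_skip_json_value_py : String × Int := ("[1, {\"a\": []}]", 0)

def Spec_skip_json_value_py (raw_text : String) (start_index : Int) (out : Int) : Prop := out = skip_json_value_py_alt raw_text start_index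
instance (raw_text : String) (start_index : Int) (out : Int) : Decidable (Spec_skip_json_value_py raw_text start_index out) := by unfold Spec_skip_json_value_py; infer_instance

-- ===== CLAIM (what is proved, stated in full; the proofs are below) =====
def Claim_equal_skip_json_value_py : Prop := ∀ (raw_text : String) (start_index : Int), Dom_skip_json_value_py raw_text start_index → Pre_skip_json_value_py raw_text start_index → Spec_skip_json_value_py raw_text start_index (skip_json_value_py raw_text start_index)

-- ===== LEMMAS AND PROOFS =====

theorem pvBCharAt_eq : pvBCharAt = pvCharAt := rfl

-- a simple escape is never 'u'
theorem pvSimpleEscape_ne_u (c : Char) (r : Char) (h : pvSimpleEscape c = some r) :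
    c ≠ 'u' := by
  intro hc; subst hc; simp [pvSimpleEscape] at h

-- B's end-of-string scanner computes exactly the (end index, complete) pair of A's
-- decode loop, independently of the accumulated text and of either fuel (both sufficient)
theorem pvBStrEnd_eq_decode (cs : List Char) (L : Int) :
    ∀ (f g : Nat) (r : List Char) (i : Int), (L - i).toNat < f → (L - i).toNat < g →
      pvBStrEnd cs L f i =
        (if (pvDecodeLoop cs L g r i).2.2 then some (pvDecodeLoop cs L g r i).2.1
         else none) := by
  intro f
  induction f with
  | zero => omega
  | succ f ih =>
    intro g r i hf hg
    obtain ⟨g, rfl⟩ : ∃ k, g = k + 1 := ⟨g - 1, by omega⟩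
    rw [pvBStrEnd, pvDecodeLoop]
    simp only [pvBCharAt_eq]
    by_cases hi : i < L
    · rw [if_pos hi, if_pos hi]
      by_cases hq : pvCharAt cs i = '"'
      · simp only [hq, reduceIte]
      · by_cases hb : pvCharAt cs i = '\\'
        · simp only [hb, ne_eq, not_true, reduceIte, Char.reduceEq]
          by_cases h1 : i + 1 ≥ L
          · rw [if_pos h1]; simp [if_pos h1]
          · rw [if_neg h1, if_neg h1]
            cases he : pvSimpleEscape (pvCharAt cs (i + 1)) with
            | some rp =>
              have hu := pvSimpleEscape_ne_u _ _ he
              rw [if_neg hu]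
              exact ih g (r ++ [rp]) (i + 2) (by omega) (by omega)
            | none =>
              by_cases hu : pvCharAt cs (i + 1) = 'u'
              · simp only [hu, reduceIte]
                by_cases h5 : i + 5 ≥ L
                · rw [if_pos h5]; simp [if_pos h5]
                · rw [if_neg h5, if_neg h5]
                  cases hx : PySem.Int.ofCharsBase?
                      (PySem.List.slice cs (some (i + 2)) (some (i + 6))) 16 with
                  | some n =>
                    by_cases hr : 0 ≤ n ∧ n ≤ 1114111
                    · simp only [if_pos hr]
                      exact ih g (r ++ [Char.ofNat n.toNat]) (i + 6) (by omega) (by omega)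
                    · simp only [if_neg hr]
                      exact ih g
                        (r ++ '\\' :: 'u' :: PySem.List.slice cs (some (i + 2)) (some (i + 6)))
                        (i + 6) (by omega) (by omega)
                  | none =>
                    exact ih g
                      (r ++ '\\' :: 'u' :: PySem.List.slice cs (some (i + 2)) (some (i + 6)))
                      (i + 6) (by omega) (by omega)
              · simp only [hu, reduceIte]
                exact ih g (r ++ [pvCharAt cs (i + 1)]) (i + 2) (by omega) (by omega)
        · simp only [hq, hb, ne_eq, reduceIte]
          exact ih g (r ++ [pvCharAt cs i]) (i + 1) (by omega) (by omega)
    · rw [if_neg hi, if_neg hi]; simp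

-- a successful string skip advances the index and stays within the text
theorem pvBStr_advance (cs : List Char) (L : Int) :
    ∀ (f : Nat) (i j : Int), pvBStr cs L f i = some j → i + 1 ≤ j ∧ j ≤ L := by
  intro f
  induction f with
  | zero => intro i j h; simp [pvBStr] at h
  | succ f ih =>
    intro i j h
    rw [pvBStr] at h
    simp only [pvBCharAt_eq] at h
    by_cases hi : i < L
    · simp only [if_pos hi] at h
      by_cases hq : pvCharAt cs i = '"'
      · simp only [hq, reduceIte, Char.reduceEq, Option.some.injEq] at h
        omega
      · simp only [if_neg hq] at h
        have h2 := ih _ _ h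
        have h3 : i + 1 ≤ i + (if pvCharAt cs i = '\\' then 2 else 1) := by split <;> omega
        omega
    · simp [if_neg hi] at h

-- a successful container skip advances the index and stays within the text
theorem pvBCont_advance (cs : List Char) (L : Int) :
    ∀ (f : Nat) (c : Char) (i j : Int), pvBCont cs L f c i = some j → i + 1 ≤ j ∧ j ≤ L := by
  intro f
  induction f with
  | zero => intro c i j h; simp [pvBCont] at h
  | succ f ih =>
    intro c i j h
    rw [pvBCont] at h
    simp only [pvBCharAt_eq] at h
    by_cases hi : i < L
    · simp only [if_pos hi] at h
      by_cases hq : pvCharAt cs i = '"'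
      · simp only [hq, reduceIte, Char.reduceEq] at h
        cases hs : pvBStr cs L f (i + 1) with
        | none => rw [hs] at h; simp at h
        | some k =>
          rw [hs] at h
          have h1 := pvBStr_advance cs L f _ _ hs
          have h2 := ih _ _ _ h
          omega
      · simp only [if_neg hq] at h
        by_cases hbr : pvCharAt cs i = '[' ∨ pvCharAt cs i = '{'
        · simp only [if_pos hbr] at h
          cases hs : pvBCont cs L f (pvCharAt cs i) (i + 1) with
          | none => rw [hs] at h; simp at h
          | some k =>
            rw [hs] at h
            have h1 := ih _ _ _ hs
            have h2 := ih _ _ _ h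
            omega
        · simp only [if_neg hbr] at h
          by_cases hcl : pvCharAt cs i = ']' ∨ pvCharAt cs i = '}'
          · simp only [if_pos hcl] at h
            by_cases hm : pvCharAt cs i = (if c = '{' then '}' else ']')
            · rw [if_pos hm] at h
              simp only [Option.some.injEq] at h
              omega
            · rw [if_neg hm] at h; simp at h
          · simp only [if_neg hcl] at h
            have := ih _ _ _ h; omega
    · simp [if_neg hi] at h

-- B's string-skip loop fails once the index has passed the end, whatever the fuel
theorem pvBStr_none (cs : List Char) (L : Int) (f : Nat) (i : Int) (hi : ¬ i < L) :
    pvBStr cs L f i = none := by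
  cases f <;> simp [pvBStr, hi]

-- A's container loop returns -1 once the index has passed the end, whatever the fuel
theorem pvACont_oob (cs : List Char) (L : Int) (g : Nat) (st : List Char) (i : Int)
    (ins esc : Bool) (hi : ¬ i < L) :
    pvAContLoop cs L g st i ins esc = -1 := by
  cases g <;> simp [pvAContLoop, hi]

-- A's container loop does not depend on the fuel, as long as it is sufficient
theorem pvACont_irrel (cs : List Char) (L : Int) :
    ∀ (g g' : Nat) (st : List Char) (i : Int) (ins esc : Bool),
      (L - i).toNat < g → (L - i).toNat < g' →
      pvAContLoop cs L g st i ins esc = pvAContLoop cs L g' st i ins esc := by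
  intro g
  induction g with
  | zero => omega
  | succ g ih =>
    intro g' st i ins esc hg hg'
    obtain ⟨g', rfl⟩ : ∃ k, g' = k + 1 := ⟨g' - 1, by omega⟩
    rw [pvAContLoop, pvAContLoop]
    by_cases hi : i < L
    · rw [if_pos hi, if_pos hi]
      cases ins with
      | true =>
        cases esc with
        | true => exact ih g' st (i + 1) true false (by omega) (by omega)
        | false =>
          by_cases hb : pvCharAt cs i = '\\'
          · simp only [hb, reduceIte, Bool.false_eq_true, Char.reduceEq]
            exact ih g' st (i + 1) true true (by omega) (by omega)
          · by_cases hq : pvCharAt cs i = '"'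
            · simp only [hb, hq, reduceIte, Bool.false_eq_true, Char.reduceEq]
              exact ih g' st (i + 1) false false (by omega) (by omega)
            · simp only [hb, hq, reduceIte, Bool.false_eq_true]
              exact ih g' st (i + 1) true false (by omega) (by omega)
      | false =>
        by_cases hq : pvCharAt cs i = '"'
        · simp only [hq, reduceIte, Bool.false_eq_true, Char.reduceEq]
          exact ih g' st (i + 1) true esc (by omega) (by omega)
        · by_cases hbr : pvCharAt cs i = '[' ∨ pvCharAt cs i = '{'
          · simp only [if_neg hq, if_pos hbr, reduceIte, Bool.false_eq_true]
            exact ih g' (pvCharAt cs i :: st) (i + 1) false esc (by omega) (by omega)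
          · by_cases hcl : pvCharAt cs i = ']' ∨ pvCharAt cs i = '}'
            · simp only [if_neg hq, if_neg hbr, if_pos hcl, reduceIte, Bool.false_eq_true]
              cases st with
              | nil => rfl
              | cons top rest =>
                by_cases hm : pvMatching top ≠ pvCharAt cs i
                · simp [hm]
                · simp only [hm, reduceIte]
                  cases rest with
                  | nil => simp
                  | cons a b =>
                    simp only [reduceIte, List.cons_ne_nil]
                    exact ih g' (a :: b) (i + 1) false esc (by omega) (by omega)
            · simp only [if_neg hq, if_neg hbr, if_neg hcl, reduceIte, Bool.false_eq_true]
              exact ih g' st (i + 1) false esc (by omega) (by omega)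
    · rw [if_neg hi, if_neg hi]

-- A's in-string mode simulates B's inline string skip
theorem pvStr_sim (cs : List Char) (L : Int) :
    ∀ (f g : Nat) (st : List Char) (i : Int), (L - i).toNat < f → (L - i).toNat < g →
      pvAContLoop cs L g st i true false =
        (match pvBStr cs L f i with
         | some j => pvAContLoop cs L g st j false false
         | none => -1) := by
  intro f
  induction f with
  | zero => omega
  | succ f ih =>
    intro g st i hf hg
    obtain ⟨g, rfl⟩ : ∃ k, g = k + 1 := ⟨g - 1, by omega⟩
    rw [pvAContLoop, pvBStr]
    simp only [pvBCharAt_eq]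
    by_cases hi : i < L
    · rw [if_pos hi, if_pos hi]
      by_cases hq : pvCharAt cs i = '"'
      · simp only [hq, reduceIte, Bool.false_eq_true, Char.reduceEq]
        exact pvACont_irrel cs L g (g + 1) st (i + 1) false false (by omega) (by omega)
      · by_cases hb : pvCharAt cs i = '\\'
        · simp only [hb, reduceIte, Bool.false_eq_true, Char.reduceEq]
          by_cases hi1 : i + 1 < L
          · obtain ⟨g, rfl⟩ : ∃ k, g = k + 1 := ⟨g - 1, by omega⟩
            rw [pvAContLoop, if_pos hi1]
            simp only [reduceIte]
            rw [show i + 1 + 1 = i + 2 by ring]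
            rw [ih g st (i + 2) (by omega) (by omega)]
            cases hs : pvBStr cs L f (i + 2) with
            | none => rfl
            | some j =>
              have hj := pvBStr_advance cs L f _ _ hs
              simp only []
              exact pvACont_irrel cs L g (g + 1 + 1) st j false false
                (by omega) (by omega)
          · rw [pvACont_oob cs L g st (i + 1) true true hi1]
            rw [pvBStr_none cs L f (i + 2) (by omega)]
        · simp only [hq, hb, reduceIte, Bool.false_eq_true]
          rw [ih g st (i + 1) (by omega) (by omega)]
          cases hs : pvBStr cs L f (i + 1) with
          | none => rfl
          | some j =>
            have hj := pvBStr_advance cs L f _ _ hs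
            simp only []
            exact pvACont_irrel cs L g (g + 1) st j false false (by omega) (by omega)
    · rw [if_neg hi, if_neg hi]

-- A's explicit-stack container loop simulates B's recursive skip-container:
-- the rest of A's stack below the top is exactly B's pending recursive calls
theorem pvCont_sim (cs : List Char) (L : Int) :
    ∀ (f g : Nat) (c : Char) (s : List Char) (i : Int),
      (L - i).toNat < f → (L - i).toNat < g →
      pvAContLoop cs L g (c :: s) i false false =
        (match pvBCont cs L f c i with
         | some j => if s = [] then j else pvAContLoop cs L g s j false false
         | none => -1) := by
  intro f
  induction f with
  | zero => omega
  | succ f ih =>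
    intro g c s i hf hg
    obtain ⟨g, rfl⟩ : ∃ k, g = k + 1 := ⟨g - 1, by omega⟩
    rw [pvAContLoop, pvBCont]
    simp only [pvBCharAt_eq]
    by_cases hi : i < L
    · rw [if_pos hi, if_pos hi]
      by_cases hq : pvCharAt cs i = '"'
      · simp only [hq, reduceIte, Bool.false_eq_true, Char.reduceEq]
        rw [pvStr_sim cs L f g (c :: s) (i + 1) (by omega) (by omega)]
        cases hs : pvBStr cs L f (i + 1) with
        | none => rfl
        | some j =>
          simp only []
          have hj := pvBStr_advance cs L f _ _ hs
          rw [ih g c s j (by omega) (by omega)]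
          cases hc : pvBCont cs L f c j with
          | none => rfl
          | some k =>
            have hk := pvBCont_advance cs L f _ _ _ hc
            by_cases hsnil : s = []
            · simp [hsnil]
            · simp only [if_neg hsnil]
              exact pvACont_irrel cs L g (g + 1) s k false false (by omega) (by omega)
      · by_cases hbr : pvCharAt cs i = '[' ∨ pvCharAt cs i = '{'
        · simp only [if_neg hq, if_pos hbr, reduceIte, Bool.false_eq_true]
          rw [ih g (pvCharAt cs i) (c :: s) (i + 1) (by omega) (by omega)]
          cases hs : pvBCont cs L f (pvCharAt cs i) (i + 1) with
          | none => rfl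
          | some j =>
            have hj := pvBCont_advance cs L f _ _ _ hs
            simp only [if_neg (by simp : ¬ (c :: s = []))]
            rw [ih g c s j (by omega) (by omega)]
            cases hc : pvBCont cs L f c j with
            | none => rfl
            | some k =>
              have hk := pvBCont_advance cs L f _ _ _ hc
              by_cases hsnil : s = []
              · simp [hsnil]
              · simp only [if_neg hsnil]
                exact pvACont_irrel cs L g (g + 1) s k false false (by omega) (by omega)
        · by_cases hcl : pvCharAt cs i = ']' ∨ pvCharAt cs i = '}'
          · simp only [if_neg hq, if_neg hbr, if_pos hcl, reduceIte, Bool.false_eq_true]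
            by_cases hm : pvCharAt cs i = (if c = '{' then '}' else ']')
            · have hpm : ¬ (pvMatching c ≠ pvCharAt cs i) := by
                simp [pvMatching, hm]
              simp only [hpm, reduceIte, ne_eq, not_not, not_true, Bool.false_eq_true]
              by_cases hsnil : s = []
              · rw [if_pos hm]; simp [hsnil]
              · rw [if_pos hm]
                simp only [if_neg hsnil]
                exact pvACont_irrel cs L g (g + 1) s (i + 1) false false (by omega) (by omega)
            · have hpm : pvMatching c ≠ pvCharAt cs i := by
                unfold pvMatching; exact fun h => hm h.symm
              simp [hpm, if_neg hm]
          · simp only [if_neg hq, if_neg hbr, if_neg hcl, reduceIte, Bool.false_eq_true]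
            rw [ih g c s (i + 1) (by omega) (by omega)]
            cases hc : pvBCont cs L f c (i + 1) with
            | none => rfl
            | some k =>
              have hk := pvBCont_advance cs L f _ _ _ hc
              by_cases hsnil : s = []
              · simp [hsnil]
              · simp only [if_neg hsnil]
                exact pvACont_irrel cs L g (g + 1) s k false false (by omega) (by omega)
    · rw [if_neg hi, if_neg hi]

-- A's primitive while-loop equals B's first-match search over range(i, L)
theorem pvPrim_eq (cs : List Char) (L : Int) :
    ∀ (g : Nat) (i : Int), i ≤ L → (L - i).toNat < g → pvAPrim cs L g i = pvBPrim cs L i := by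
  intro g
  induction g with
  | zero => omega
  | succ g ih =>
    intro i hle hg
    by_cases hi : i < L
    · rw [pvAPrim, if_pos hi]
      unfold pvBPrim
      rw [PySem.List.pyRange_one_cons hi]
      by_cases hp : pvCharAt cs i = ',' ∨ pvCharAt cs i = '}'
      · have hb : ((pvBCharAt cs i == ',') || (pvBCharAt cs i == '}')) = true := by
          rw [pvBCharAt_eq]; rcases hp with h | h <;> simp [h]
        simp only [List.find?_cons, hb]
        simp [hp]
      · have hb : ((pvBCharAt cs i == ',') || (pvBCharAt cs i == '}')) = false := by
          rw [pvBCharAt_eq]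
          push_neg at hp
          simp [hp.1, hp.2]
        simp only [List.find?_cons, hb]
        rw [if_pos hp, ih (i + 1) (by omega) (by omega)]
        rfl
    · rw [pvAPrim, if_neg hi]
      unfold pvBPrim
      rw [PySem.List.pyRange_one_eq_nil (by omega)]
      simp
      omega

-- ===== VERDICT (by name: the statement is the Claim_ definition above) =====
theorem skip_json_value_py_spec : Claim_equal_skip_json_value_py := by
  intro raw_text start_index _hdom hpre
  unfold Spec_skip_json_value_py skip_json_value_py skip_json_value_py_alt
  simp only [pvBCharAt_eq]
  set cs := raw_text.toList with hcs
  set L : Int := (cs.length : Int) with hL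
  by_cases h1 : start_index ≥ L
  · rw [if_pos h1, if_pos h1]
  · rw [if_neg h1, if_neg h1]
    have hpre' : -(L : Int) ≤ start_index := hpre
    by_cases h2 : pvCharAt cs start_index = '"'
    · rw [if_pos h2, if_pos h2]
      have hcond : ¬ (start_index ≥ L ∨ pvCharAt cs start_index ≠ '"') := by
        push_neg; exact ⟨by omega, h2⟩
      simp only [pvDecodeStringAt, if_neg hcond]
      rw [pvBStrEnd_eq_decode cs L (2 * cs.length + 2) (2 * cs.length + 2) []
        (start_index + 1) (by omega) (by omega)]
      cases h : (pvDecodeLoop cs L (2 * cs.length + 2) [] (start_index + 1)).2.2 <;> simp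
    · rw [if_neg h2, if_neg h2]
      by_cases h3 : pvCharAt cs start_index = '[' ∨ pvCharAt cs start_index = '{'
      · rw [if_pos h3, if_pos h3]
        rw [pvCont_sim cs L (2 * cs.length + 2) (2 * cs.length + 2)
          (pvCharAt cs start_index) [] (start_index + 1) (by omega) (by omega)]
        cases pvBCont cs L (2 * cs.length + 2) (pvCharAt cs start_index) (start_index + 1) with
        | none => rfl
        | some j => simp
      · rw [if_neg h3, if_neg h3]
        exact pvPrim_eq cs L (2 * cs.length + 2) start_index (by omega) (by omega)
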